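-- pv_equiv track=rewrite | github.com/maxi7665/IB | keyword_replace.py | matrix_str
-- ===== SOURCE A (Python) =====
-- def matrix_str(matrix: list, is_formatted=True):
--     text=""
--     row=0
--     col=0
--     while True:
--
--         if col >= len(matrix):
--             col=0
--             row+=1
--             if is_formatted:
--                 text += "\r\n"
--
--         column = matrix[col]
--
--         if row >= len(column):
--             if col == 0:
--                 break
--             #c = "-"
--         else:
--             c = column[row]
--
--         text+=c
--         if is_formatted:
--             text += " "
--         col+=1
--     return text
-- ===== SOURCE B (Python) =====
-- def matrix_str(matrix: list, is_formatted=True):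
--     rows = len(matrix[0])
--     text = ""
--     c = ""
--     for row in range(rows):
--         for column in matrix:
--             if row < len(column):
--                 c = column[row]
--             text += c
--             if is_formatted:
--                 text += " "
--         if is_formatted:
--             text += "\r\n"
--     return text
-- ===== Notes on version B (the rewrite author's own statement) =====
-- stated objective: simpler
-- what changed: Replaces the wrap-around while-True state machine (manual col/row counters, sentinel reset, break in mid-loop) with plain nested for-loops over range(len(matrix[0])) and the columns, carrying the last seen cell for short columns.
import Mathlib
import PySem

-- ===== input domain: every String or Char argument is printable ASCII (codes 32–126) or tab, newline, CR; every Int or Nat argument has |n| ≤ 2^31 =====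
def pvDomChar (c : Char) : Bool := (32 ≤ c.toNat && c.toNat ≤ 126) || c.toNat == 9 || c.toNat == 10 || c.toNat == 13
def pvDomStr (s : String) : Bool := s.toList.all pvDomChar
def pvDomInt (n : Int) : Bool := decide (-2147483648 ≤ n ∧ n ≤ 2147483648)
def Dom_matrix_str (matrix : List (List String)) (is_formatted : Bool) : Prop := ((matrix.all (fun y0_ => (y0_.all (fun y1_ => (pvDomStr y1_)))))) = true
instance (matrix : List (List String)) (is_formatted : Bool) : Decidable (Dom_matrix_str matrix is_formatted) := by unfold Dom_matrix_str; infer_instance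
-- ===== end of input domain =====

-- B replaces A's wrap-around `while True` state machine with plain nested for-loops
-- (rows × columns) carrying the last seen cell; objective: simpler.

-- ===== PORT A =====
-- A's `while True` loop, step for step; `fuel` is only a totality guard
-- (matrix_str supplies enough, proved below), the 0 case is never reached on Pre_.
def matrix_strLoop (matrix : List (List String)) (is_formatted : Bool) :
    Nat → String → String → Nat → Nat → String
  | 0, text, _, _, _ => text
  | fuel+1, text, c, row, col =>
    -- if col >= len(matrix): col = 0; row += 1; if is_formatted: text += "\r\n"
    let text := if col ≥ matrix.length then (if is_formatted then text ++ "\r\n" else text) else text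
    let row := if col ≥ matrix.length then row + 1 else row
    let col := if col ≥ matrix.length then 0 else col
    -- column = matrix[col]  (IndexError on empty matrix: outside Pre_, none → return)
    match matrix[col]? with
    | none => text
    | some column =>
      if row ≥ column.length then
        if col = 0 then text  -- break
        else
          -- c unchanged; text += c; if is_formatted: text += " "; col += 1
          let text := text ++ c
          let text := if is_formatted then text ++ " " else text
          matrix_strLoop matrix is_formatted fuel text c row (col+1)
      else
        let c := column[row]!
        let text := text ++ c
        let text := if is_formatted then text ++ " " else text
        matrix_strLoop matrix is_formatted fuel text c row (col+1)

def matrix_str (matrix : List (List String)) (is_formatted : Bool) : String :=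
  matrix_strLoop matrix is_formatted
    (((matrix[0]?.getD []).length + 2) * (matrix.length + 2)) "" "" 0 0

-- ===== PORT B =====
def matrix_str_alt (matrix : List (List String)) (is_formatted : Bool) : String :=
  match matrix[0]? with
  | none => ""  -- Python B: len(matrix[0]) raises IndexError on []; outside Pre_
  | some col0 =>
    ((List.range col0.length).foldl (fun (acc : String × String) row =>
        let inner := matrix.foldl (fun (acc : String × String) column =>
            let c := match column[row]? with | some x => x | none => acc.2
            let text := acc.1 ++ c
            let text := if is_formatted then text ++ " " else text
            (text, c)) acc
        ((if is_formatted then inner.1 ++ "\r\n" else inner.1), inner.2)) ("", "")).1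

-- ===== PRECONDITION & SPEC =====
-- Pre_ excludes only the empty matrix, on which both Pythons raise IndexError.
def Pre_matrix_str (matrix : List (List String)) (is_formatted : Bool) : Prop := matrix ≠ []
instance (matrix : List (List String)) (is_formatted : Bool) : Decidable (Pre_matrix_str matrix is_formatted) := by unfold Pre_matrix_str; infer_instance

def pvWitness_matrix_str : List (List String) × Bool := ([["ab", "c"], ["d"]], true)

def Spec_matrix_str (matrix : List (List String)) (is_formatted : Bool) (out : String) : Prop := out = matrix_str_alt matrix is_formatted
instance (matrix : List (List String)) (is_formatted : Bool) (out : String) : Decidable (Spec_matrix_str matrix is_formatted out) := by unfold Spec_matrix_str; infer_instance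

-- ===== CLAIM (what is proved, stated in full; the proofs are below) =====
def Claim_equal_matrix_str : Prop := ∀ (matrix : List (List String)) (is_formatted : Bool), Dom_matrix_str matrix is_formatted → Pre_matrix_str matrix is_formatted → Spec_matrix_str matrix is_formatted (matrix_str matrix is_formatted)

-- ===== LEMMAS AND PROOFS =====

-- Accumulator-style description of one rendered row (columns `cols`, carried cell `c`).
def rowAcc (fmt : Bool) (row : Nat) : List (List String) → String → String → String × String
  | [], text, c => (text, c)
  | column :: rest, text, c =>
    let c := match column[row]? with | some x => x | none => c
    let text := text ++ c
    let text := if fmt then text ++ " " else text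
    rowAcc fmt row rest text c

-- Rows row, row+1, …, row+k-1 rendered, each followed by the "\r\n" wrap.
def rowsAcc (fmt : Bool) (matrix : List (List String)) : Nat → Nat → String → String → String
  | 0, _, text, _ => text
  | k+1, row, text, c =>
    let p := rowAcc fmt row matrix text c
    rowsAcc fmt matrix k (row+1) (if fmt then p.1 ++ "\r\n" else p.1) p.2

theorem rowAcc_eq_foldl (fmt : Bool) (row : Nat) (cols : List (List String)) :
    ∀ (text c : String),
      cols.foldl (fun (acc : String × String) column =>
          let c := match column[row]? with | some x => x | none => acc.2
          let text := acc.1 ++ c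
          let text := if fmt then text ++ " " else text
          (text, c)) (text, c) = rowAcc fmt row cols text c := by
  induction cols with
  | nil => intro text c; rfl
  | cons column rest ih => intro text c; simp only [List.foldl_cons, rowAcc]; exact ih _ _

theorem rowsAcc_eq_foldl (fmt : Bool) (matrix : List (List String)) :
    ∀ (k row : Nat) (text c : String),
      ((List.range' row k).foldl (fun (acc : String × String) row =>
          let inner := matrix.foldl (fun (acc : String × String) column =>
              let c := match column[row]? with | some x => x | none => acc.2
              let text := acc.1 ++ c
              let text := if fmt then text ++ " " else text
              (text, c)) acc
          ((if fmt then inner.1 ++ "\r\n" else inner.1), inner.2)) (text, c)).1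
      = rowsAcc fmt matrix k row text c := by
  intro k
  induction k with
  | zero => intro row text c; rfl
  | succ k ih =>
    intro row text c
    rw [List.range'_succ, List.foldl_cons]
    simp only [rowAcc_eq_foldl]
    exact ih (row+1) _ _

-- The main loop invariant for A: from any mid-loop state (text, c, row, col) with
-- row < len(matrix[0]) and col ≤ len(matrix), the loop finishes the current row
-- from column `col` and then renders the remaining rows.
theorem matrix_strLoop_eq (fmt : Bool) (col0 : List String) (tl : List (List String)) :
    ∀ (fuel row col : Nat) (text c : String),
      row < col0.length → col ≤ (col0 :: tl).length →
      (col0.length - row) * ((col0 :: tl).length + 2) + ((col0 :: tl).length + 1 - col) ≤ fuel →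
      matrix_strLoop (col0 :: tl) fmt fuel text c row col =
        (let p := rowAcc fmt row ((col0 :: tl).drop col) text c
         rowsAcc fmt (col0 :: tl) (col0.length - row - 1) (row+1)
           (if fmt then p.1 ++ "\r\n" else p.1) p.2) := by
  intro fuel
  induction fuel with
  | zero =>
    intro row col text c hrow hcol hfuel
    exfalso
    have hpos : 0 < (col0.length - row) * ((col0 :: tl).length + 2) :=
      Nat.mul_pos (by omega) (by omega)
    omega
  | succ fuel ih =>
    intro row col text c hrow hcol hfuel
    simp only [List.length_cons] at hcol hfuel ⊢
    by_cases hc : col ≥ tl.length + 1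
    · -- col = len(matrix): wrap to next row
      have hcol' : col = tl.length + 1 := by omega
      subst hcol'
      simp only [matrix_strLoop, List.length_cons, ge_iff_le, le_refl, if_pos]
      have hdrop : (col0 :: tl).drop (tl.length + 1) = [] := by
        apply List.drop_eq_nil_of_le; simp
      rw [hdrop]
      simp only [List.getElem?_cons_zero, rowAcc]
      by_cases hend : row + 1 ≥ col0.length
      · -- break
        have h0 : col0.length - row - 1 = 0 := by omega
        rw [if_pos hend, h0]
        rfl
      · -- next row: c := matrix[0][row+1], continue at col = 1
        rw [if_neg hend]
        have hlt : row + 1 < col0.length := by omega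
        have hk : ∃ k, col0.length - row - 1 = k + 1 := ⟨col0.length - row - 2, by omega⟩
        obtain ⟨k, hkeq⟩ := hk
        rw [hkeq]
        simp only [rowsAcc]
        have hmul : (col0.length - row) * (tl.length + 1 + 2)
            = (col0.length - (row + 1)) * (tl.length + 1 + 2) + (tl.length + 1 + 2) := by
          have : col0.length - row = (col0.length - (row + 1)) + 1 := by omega
          rw [this]; ring
        have hfu : (col0.length - (row + 1)) * ((col0 :: tl).length + 2)
            + ((col0 :: tl).length + 1 - 1) ≤ fuel := by
          simp only [List.length_cons]; omega
        rw [ih (row + 1) 1 _ _ hlt (by simp) hfu]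
        have hdrop1 : (col0 :: tl).drop 1 = tl := rfl
        rw [hdrop1]
        have hget : col0[row + 1]! = col0[row + 1] := getElem!_pos col0 (row + 1) hlt
        simp only [rowAcc, List.getElem?_eq_getElem hlt, hget]
        have hkk : col0.length - (row + 1) - 1 = k := by omega
        rw [hkk]
    · -- col < len(matrix): one more cell of the current row
      push_neg at hc
      simp only [matrix_strLoop, List.length_cons]
      rw [if_neg (by omega), if_neg (by omega), if_neg (by omega)]
      have hlt : col < (col0 :: tl).length := by simp; omega
      have hdrop : (col0 :: tl).drop col = (col0 :: tl)[col] :: (col0 :: tl).drop (col + 1) :=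
        List.drop_eq_getElem_cons hlt
      rw [List.getElem?_eq_getElem hlt, hdrop]
      set column := (col0 :: tl)[col] with hcoldef
      simp only []
      by_cases hshort : row ≥ column.length
      · -- short column: c is reused
        have hc0 : ¬ col = 0 := by
          intro h0
          subst h0
          have : column = col0 := by simp [hcoldef]
          rw [this] at hshort
          omega
        rw [if_pos hshort, if_neg hc0]
        rw [ih row (col + 1) _ _ hrow (by simp; omega) (by simp only [List.length_cons]; omega)]
        have hnone : column[row]? = none := by
          rw [List.getElem?_eq_none]; omega
        simp only [rowAcc, hnone]
      · -- normal cell: c := column[row]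
        push_neg at hshort
        rw [if_neg (by omega)]
        rw [ih row (col + 1) _ _ hrow (by simp; omega) (by simp only [List.length_cons]; omega)]
        have hget : column[row]! = column[row] := getElem!_pos column row hshort
        simp only [rowAcc, List.getElem?_eq_getElem hshort, hget]

theorem matrix_str_alt_eq (col0 : List String) (tl : List (List String)) (fmt : Bool) :
    matrix_str_alt (col0 :: tl) fmt = rowsAcc fmt (col0 :: tl) col0.length 0 "" "" := by
  unfold matrix_str_alt
  simp only [List.getElem?_cons_zero]
  rw [List.range_eq_range']
  exact rowsAcc_eq_foldl fmt (col0 :: tl) col0.length 0 "" ""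

-- ===== VERDICT (by name: the statement is the Claim_ definition above) =====
theorem matrix_str_spec : Claim_equal_matrix_str := by
  intro matrix is_formatted _ hpre
  unfold Spec_matrix_str
  obtain ⟨col0, tl, rfl⟩ : ∃ c t, matrix = c :: t := by
    cases matrix with
    | nil => exact absurd rfl hpre
    | cons a b => exact ⟨a, b, rfl⟩
  rw [matrix_str_alt_eq]
  unfold matrix_str
  simp only [List.getElem?_cons_zero, Option.getD_some, List.length_cons]
  by_cases hR : col0.length = 0
  · -- empty first column: A breaks immediately, B renders no rows
    obtain ⟨f, hf⟩ : ∃ f, (col0.length + 2) * (tl.length + 1 + 2) = f + 1 := by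
      have := Nat.mul_pos (n := col0.length + 2) (m := tl.length + 1 + 2) (by omega) (by omega)
      exact ⟨(col0.length + 2) * (tl.length + 1 + 2) - 1, by omega⟩
    rw [hf, hR]
    simp [matrix_strLoop, rowsAcc, hR]
  · obtain ⟨k, hk⟩ : ∃ k, col0.length = k + 1 := ⟨col0.length - 1, by omega⟩
    rw [matrix_strLoop_eq is_formatted col0 tl _ 0 0 "" ""
      (by omega) (by simp)
      (by
        simp only [List.length_cons, Nat.sub_zero]
        have : (col0.length + 2) * (tl.length + 1 + 2)
            = col0.length * (tl.length + 1 + 2) + 2 * (tl.length + 1 + 2) := by ring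
        omega)]
    rw [hk]
    norm_num [rowsAcc]
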